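-- pv_equiv track=rewrite | github.com/DarkCarnages/Simulation_Of_Encoding_And_Decoding | Simulation 1/encoding.py | bipolar_rz_encode
-- ===== SOURCE A (Python) =====
-- def bipolar_rz_encode(bitstream):
--     """+1, -1 alternating for 1s, zero for 0, return-to-zero in middle."""
--     signal = []
--     last = -1
--     for bit in bitstream:
--         if bit == 1:
--             last = -last  # alternate polarity
--             signal.extend([last, 0])  # RZ: return to zero
--         else:
--             signal.extend([0, 0])
--     return signal
-- ===== SOURCE B (Python) =====
-- def bipolar_rz_encode(bitstream):
--     """Two passes: prefix-count of 1-bits, then build output from bit/count pairs."""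
--     counts = []
--     c = 0
--     for bit in bitstream:
--         if bit == 1:
--             c += 1
--         counts.append(c)
--     out = []
--     for bit, c in zip(bitstream, counts):
--         out.extend([1 if c % 2 == 1 else -1, 0] if bit == 1 else [0, 0])
--     return out
-- ===== Notes on version B (the rewrite author's own statement) =====
-- stated objective: alternative
-- what changed: Replaces the single stateful loop that flips a polarity variable by two separate passes: one pass computes the running count of 1-bits, a second pass maps each (bit, count) pair to its two output samples, deriving polarity from the count's parity.
import Mathlib
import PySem

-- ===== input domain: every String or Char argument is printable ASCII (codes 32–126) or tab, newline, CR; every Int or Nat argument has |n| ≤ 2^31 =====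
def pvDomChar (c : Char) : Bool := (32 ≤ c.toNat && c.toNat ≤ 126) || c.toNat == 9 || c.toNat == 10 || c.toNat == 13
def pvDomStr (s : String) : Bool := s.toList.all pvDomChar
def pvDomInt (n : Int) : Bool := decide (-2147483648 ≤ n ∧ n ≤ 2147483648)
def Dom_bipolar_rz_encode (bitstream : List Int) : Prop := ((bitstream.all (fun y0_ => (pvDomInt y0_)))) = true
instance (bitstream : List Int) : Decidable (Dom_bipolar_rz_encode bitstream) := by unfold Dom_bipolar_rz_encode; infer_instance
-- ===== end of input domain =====

-- B replaces A's single stateful polarity-flipping loop by two passes (prefix count of 1-bits,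
-- then a mapping pass deriving polarity from the count's parity); alternative decomposition, same cost.


-- ===== PORT A =====
-- loop body of A: state is (signal, last); flip `last` and emit [last, 0] on a 1-bit, else emit [0, 0]
def pvAStep (st : List Int × Int) (bit : Int) : List Int × Int :=
  if bit == 1 then (st.1 ++ [-st.2, 0], -st.2) else (st.1 ++ [0, 0], st.2)

-- literal transliteration of A: one loop carrying (signal, last)
def bipolar_rz_encode (bitstream : List Int) : List Int :=
  (bitstream.foldl pvAStep ([], -1)).1

-- ===== PORT B =====
-- loop body of Source B's first pass: state is (counts, c)
def pvBStep (st : List Int × Int) (bit : Int) : List Int × Int :=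
  let c := if bit == 1 then st.2 + 1 else st.2
  (st.1 ++ [c], c)

-- first pass of Source B: the list of running counts of 1-bits
def pvCounts_bipolar (bitstream : List Int) : List Int :=
  (bitstream.foldl pvBStep ([], 0)).1

-- second pass of Source B: map each (bit, running count) pair to its two samples
def bipolar_rz_encode_alt (bitstream : List Int) : List Int :=
  (bitstream.zip (pvCounts_bipolar bitstream)).flatMap (fun p =>
    if p.1 == 1 then [if p.2 % 2 == 1 then 1 else -1, 0] else [0, 0])

-- ===== PRECONDITION & SPEC =====
def Spec_bipolar_rz_encode (bitstream : List Int) (out : List Int) : Prop := out = bipolar_rz_encode_alt bitstream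
instance (bitstream : List Int) (out : List Int) : Decidable (Spec_bipolar_rz_encode bitstream out) := by unfold Spec_bipolar_rz_encode; infer_instance

-- ===== CLAIM (what is proved, stated in full; the proofs are below) =====
def Claim_equal_bipolar_rz_encode : Prop := ∀ (bitstream : List Int), Dom_bipolar_rz_encode bitstream → Spec_bipolar_rz_encode bitstream (bipolar_rz_encode bitstream)

-- ===== LEMMAS AND PROOFS =====

-- A's loop with an arbitrary accumulated signal prefix
lemma afold_append (l : List Int) (s : List Int) (last : Int) :
    (l.foldl pvAStep (s, last)).1 = s ++ (l.foldl pvAStep ([], last)).1 := by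
  induction l generalizing s last with
  | nil => simp
  | cons b t ih =>
    simp only [List.foldl_cons, pvAStep]
    by_cases hb : b == 1 <;> simp only [hb, if_true, if_false, Bool.false_eq_true] <;>
      rw [ih, ih ([] ++ [_, _])] <;> simp

-- B's first pass with an arbitrary accumulated prefix
lemma cfold_append (l : List Int) (s : List Int) (c : Int) :
    (l.foldl pvBStep (s, c)).1 = s ++ (l.foldl pvBStep ([], c)).1 := by
  induction l generalizing s c with
  | nil => simp
  | cons b t ih =>
    simp only [List.foldl_cons, pvBStep]
    rw [ih, ih ([] ++ [_])]
    simp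

-- counts-from-c, the generalisation of pvCounts_bipolar
def pvCountsFrom (l : List Int) (c : Int) : List Int :=
  (l.foldl pvBStep ([], c)).1

lemma countsFrom_cons (b : Int) (t : List Int) (c : Int) :
    pvCountsFrom (b :: t) c
      = (if b == 1 then c + 1 else c) :: pvCountsFrom t (if b == 1 then c + 1 else c) := by
  simp only [pvCountsFrom, List.foldl_cons, pvBStep, List.nil_append]
  rw [cfold_append t [_]]
  rfl

-- the core equivalence, generalised over the running count (A's `last` is the parity sign of c)
lemma key (l : List Int) (c : Int) (hc : 0 ≤ c) :
    (l.foldl pvAStep ([], if c % 2 == 1 then (1:Int) else -1)).1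
    = (l.zip (pvCountsFrom l c)).flatMap (fun p =>
        if p.1 == 1 then [if p.2 % 2 == 1 then (1:Int) else -1, 0] else [0, 0]) := by
  induction l generalizing c with
  | nil => simp [pvCountsFrom]
  | cons b t ih =>
    rw [countsFrom_cons]
    have hpar : ((c + 1) % 2 == 1) = !(c % 2 == 1) := by
      have h2 : c % 2 = 0 ∨ c % 2 = 1 := Int.emod_two_eq_zero_or_one c
      rcases h2 with h | h <;> simp [Int.add_emod, h]
    have hneg : -(if c % 2 == 1 then (1:Int) else -1)
        = (if (c + 1) % 2 == 1 then (1:Int) else -1) := by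
      rw [hpar]; by_cases h : (c % 2 == 1) <;> simp [h]
    by_cases hb : b == 1
    · simp only [List.foldl_cons, List.zip_cons_cons, List.flatMap_cons, pvAStep, hb, if_true]
      rw [afold_append, hneg, ih (c + 1) (by omega)]
      simp
    · simp only [List.foldl_cons, List.zip_cons_cons, List.flatMap_cons, pvAStep, hb,
        Bool.false_eq_true, if_false]
      rw [afold_append, ih c hc]
      simp

-- ===== VERDICT (by name: the statement is the Claim_ definition above) =====
theorem bipolar_rz_encode_spec : Claim_equal_bipolar_rz_encode := by
  intro bs _
  show bipolar_rz_encode bs = bipolar_rz_encode_alt bs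
  have h := key bs 0 le_rfl
  simpa [bipolar_rz_encode, bipolar_rz_encode_alt, pvCounts_bipolar, pvCountsFrom] using h
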